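-- pv_equiv track=rewrite | github.com/gabrielnogueiraz/Lumi-IA | services/task_intelligence.py | _estimate_from_description
-- ===== SOURCE A (Python) =====
-- def _estimate_from_description(description: str) -> int:
--     """Estimate pomodoros from task description"""
--     description_lower = description.lower()
--
--     # Simple heuristic based on keywords
--     if any(word in description_lower for word in ["rápido", "quick", "simples", "revisar"]):
--         return 1
--     elif any(word in description_lower for word in ["estudar", "ler", "pesquisar"]):
--         return 2
--     elif any(word in description_lower for word in ["projeto", "criar", "desenvolver"]):
--         return 3
--     elif any(word in description_lower for word in ["complexo", "difícil", "grande"]):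
--         return 4
--     else:
--         return 2  # Default
-- ===== SOURCE B (Python) =====
-- # Values grow with branch priority in A, so the first matching branch's value
-- # equals the minimum value over ALL matched keywords.
-- _KEYWORD_POMODOROS = {
--     "rápido": 1, "quick": 1, "simples": 1, "revisar": 1,
--     "estudar": 2, "ler": 2, "pesquisar": 2,
--     "projeto": 3, "criar": 3, "desenvolver": 3,
--     "complexo": 4, "difícil": 4, "grande": 4,
-- }
--
-- def _estimate_from_description(description: str) -> int:
--     """Estimate pomodoros: minimum value among all matched keywords, default 2."""
--     dl = description.lower()
--     return min((p for w, p in _KEYWORD_POMODOROS.items() if w in dl), default=2)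
-- ===== Notes on version B (the rewrite author's own statement) =====
-- stated objective: alternative
-- what changed: Replaces the ordered if/elif group chain with a flat keyword->pomodoros dict and returns the MINIMUM value over all matched keywords (default 2); correct because branch values are strictly increasing with branch priority, so the minimum matched value equals the first matching branch's value.
import Mathlib
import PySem

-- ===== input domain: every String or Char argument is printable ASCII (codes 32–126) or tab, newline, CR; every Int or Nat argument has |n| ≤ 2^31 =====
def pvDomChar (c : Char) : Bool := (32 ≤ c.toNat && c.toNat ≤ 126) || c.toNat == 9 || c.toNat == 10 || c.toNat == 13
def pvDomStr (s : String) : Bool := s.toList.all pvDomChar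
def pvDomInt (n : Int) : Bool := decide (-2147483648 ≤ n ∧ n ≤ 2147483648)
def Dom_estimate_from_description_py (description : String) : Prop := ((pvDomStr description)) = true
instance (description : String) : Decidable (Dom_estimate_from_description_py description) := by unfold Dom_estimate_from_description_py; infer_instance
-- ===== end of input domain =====

-- B replaces A's ordered if/elif group chain by a flat keyword->value table and the minimum
-- value over ALL matched keywords (alternative algorithm; correct because branch values increase with priority).


-- ===== PORT A =====
def estimate_from_description_py (description : String) : Int :=
  let description_lower := PySem.Str.lower description
  if ["rápido", "quick", "simples", "revisar"].any (fun word => PySem.Str.isIn word description_lower) then 1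
  else if ["estudar", "ler", "pesquisar"].any (fun word => PySem.Str.isIn word description_lower) then 2
  else if ["projeto", "criar", "desenvolver"].any (fun word => PySem.Str.isIn word description_lower) then 3
  else if ["complexo", "difícil", "grande"].any (fun word => PySem.Str.isIn word description_lower) then 4
  else 2

-- ===== PORT B =====
-- flat dict keyword -> pomodoros, as an insertion-ordered association list
def keywordPomodoros : List (String × Int) :=
  [("rápido", 1), ("quick", 1), ("simples", 1), ("revisar", 1),
   ("estudar", 2), ("ler", 2), ("pesquisar", 2),
   ("projeto", 3), ("criar", 3), ("desenvolver", 3),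
   ("complexo", 4), ("difícil", 4), ("grande", 4)]

-- min((p for w, p in _KEYWORD_POMODOROS.items() if w in dl), default=2)
def estimate_from_description_py_alt (description : String) : Int :=
  let dl := PySem.Str.lower description
  PySem.List.minD ((keywordPomodoros.filter (fun wp => PySem.Str.isIn wp.1 dl)).map Prod.snd) id 2

-- ===== PRECONDITION & SPEC =====
def Spec_estimate_from_description_py (description : String) (out : Int) : Prop := out = estimate_from_description_py_alt description
instance (description : String) (out : Int) : Decidable (Spec_estimate_from_description_py description out) := by unfold Spec_estimate_from_description_py; infer_instance

-- ===== CLAIM =====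
def Claim_equal_estimate_from_description_py : Prop := ∀ (description : String), Dom_estimate_from_description_py description → Spec_estimate_from_description_py description (estimate_from_description_py description)

-- ===== LEMMAS AND PROOFS =====

-- the keyword table split into the four constant-valued groups (definitional)
def pvG1 : List (String × Int) := [("rápido", 1), ("quick", 1), ("simples", 1), ("revisar", 1)]
def pvG2 : List (String × Int) := [("estudar", 2), ("ler", 2), ("pesquisar", 2)]
def pvG3 : List (String × Int) := [("projeto", 3), ("criar", 3), ("desenvolver", 3)]
def pvG4 : List (String × Int) := [("complexo", 4), ("difícil", 4), ("grande", 4)]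

def pvM1 (dl : String) : List Int := (pvG1.filter (fun wp => PySem.Str.isIn wp.1 dl)).map Prod.snd
def pvM2 (dl : String) : List Int := (pvG2.filter (fun wp => PySem.Str.isIn wp.1 dl)).map Prod.snd
def pvM3 (dl : String) : List Int := (pvG3.filter (fun wp => PySem.Str.isIn wp.1 dl)).map Prod.snd
def pvM4 (dl : String) : List Int := (pvG4.filter (fun wp => PySem.Str.isIn wp.1 dl)).map Prod.snd

-- the folding step of PySem.List.min? with key = id, at type Int
def pvStep : Option Int → Int → Option Int :=
  fun acc x => match acc with
    | none => some x
    | some m => if x < m then some x else some m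

lemma pv_min?_eq (xs : List Int) : PySem.List.min? xs id = xs.foldl pvStep none := by
  rw [PySem.List.min?]
  congr 1
  funext acc x
  cases acc <;> rfl

lemma pv_keep (v : Int) (xs : List Int) (h : ∀ x ∈ xs, v ≤ x) :
    xs.foldl pvStep (some v) = some v := by
  induction xs with
  | nil => rfl
  | cons a t ih =>
      have ha : v ≤ a := h a (by simp)
      have : pvStep (some v) a = some v := by
        simp only [pvStep]
        rw [if_neg (by omega)]
      simp only [List.foldl_cons, this]
      exact ih (fun x hx => h x (by simp [hx]))

lemma pv_first (v : Int) (l xs : List Int) (hl : l ≠ []) (hall : ∀ x ∈ l, x = v)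
    (hxs : ∀ x ∈ xs, v ≤ x) : (l ++ xs).foldl pvStep none = some v := by
  cases l with
  | nil => exact absurd rfl hl
  | cons a t =>
      have ha : a = v := hall a (by simp)
      have hstep : pvStep none a = some v := by simp [pvStep, ha]
      simp only [List.cons_append, List.foldl_cons, hstep]
      exact pv_keep v (t ++ xs) (by
        intro x hx
        rcases List.mem_append.mp hx with h | h
        · exact le_of_eq (hall x (by simp [h])).symm
        · exact hxs x h)

lemma pv_first_nil (v : Int) (l : List Int) (hl : l ≠ []) (hall : ∀ x ∈ l, x = v) :
    l.foldl pvStep none = some v := by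
  have := pv_first v l [] hl hall (by simp)
  simpa using this

lemma pv_min_groups (m1 m2 m3 m4 : List Int)
    (h1 : ∀ x ∈ m1, x = 1) (h2 : ∀ x ∈ m2, x = 2)
    (h3 : ∀ x ∈ m3, x = 3) (h4 : ∀ x ∈ m4, x = 4) :
    ((m1 ++ (m2 ++ (m3 ++ m4))).foldl pvStep none).getD 2 =
      if m1 = [] then (if m2 = [] then (if m3 = [] then (if m4 = [] then 2 else 4) else 3) else 2)
      else 1 := by
  by_cases e1 : m1 = []
  · rw [if_pos e1, e1, List.nil_append]
    by_cases e2 : m2 = []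
    · rw [if_pos e2, e2, List.nil_append]
      by_cases e3 : m3 = []
      · rw [if_pos e3, e3, List.nil_append]
        by_cases e4 : m4 = []
        · rw [if_pos e4, e4]; rfl
        · rw [if_neg e4, pv_first_nil 4 m4 e4 h4]; rfl
      · rw [if_neg e3,
            pv_first 3 m3 m4 e3 h3 (fun x hx => by have := h4 x hx; omega)]
        rfl
    · rw [if_neg e2,
          pv_first 2 m2 (m3 ++ m4) e2 h2 (by
            intro x hx
            rcases List.mem_append.mp hx with h | h
            · have := h3 x h; omega
            · have := h4 x h; omega)]
      rfl
  · rw [if_neg e1,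
        pv_first 1 m1 (m2 ++ (m3 ++ m4)) e1 h1 (by
          intro x hx
          rcases List.mem_append.mp hx with h | h
          · have := h2 x h; omega
          · rcases List.mem_append.mp h with h' | h'
            · have := h3 x h'; omega
            · have := h4 x h'; omega)]
    rfl

lemma pvG1_spec (dl : String) :
    (∀ x ∈ pvM1 dl, x = 1) ∧
    (pvM1 dl = [] ↔ (["rápido", "quick", "simples", "revisar"] : List String).any
      (fun word => PySem.Str.isIn word dl) = false) := by
  simp only [pvM1, pvG1, List.filter_cons, List.filter_nil, List.any_cons, List.any_nil]
  generalize PySem.Str.isIn "rápido" dl = b1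
  generalize PySem.Str.isIn "quick" dl = b2
  generalize PySem.Str.isIn "simples" dl = b3
  generalize PySem.Str.isIn "revisar" dl = b4
  revert b1 b2 b3 b4; decide

lemma pvG2_spec (dl : String) :
    (∀ x ∈ pvM2 dl, x = 2) ∧
    (pvM2 dl = [] ↔ (["estudar", "ler", "pesquisar"] : List String).any
      (fun word => PySem.Str.isIn word dl) = false) := by
  simp only [pvM2, pvG2, List.filter_cons, List.filter_nil, List.any_cons, List.any_nil]
  generalize PySem.Str.isIn "estudar" dl = b1
  generalize PySem.Str.isIn "ler" dl = b2
  generalize PySem.Str.isIn "pesquisar" dl = b3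
  revert b1 b2 b3; decide

lemma pvG3_spec (dl : String) :
    (∀ x ∈ pvM3 dl, x = 3) ∧
    (pvM3 dl = [] ↔ (["projeto", "criar", "desenvolver"] : List String).any
      (fun word => PySem.Str.isIn word dl) = false) := by
  simp only [pvM3, pvG3, List.filter_cons, List.filter_nil, List.any_cons, List.any_nil]
  generalize PySem.Str.isIn "projeto" dl = b1
  generalize PySem.Str.isIn "criar" dl = b2
  generalize PySem.Str.isIn "desenvolver" dl = b3
  revert b1 b2 b3; decide

lemma pvG4_spec (dl : String) :
    (∀ x ∈ pvM4 dl, x = 4) ∧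
    (pvM4 dl = [] ↔ (["complexo", "difícil", "grande"] : List String).any
      (fun word => PySem.Str.isIn word dl) = false) := by
  simp only [pvM4, pvG4, List.filter_cons, List.filter_nil, List.any_cons, List.any_nil]
  generalize PySem.Str.isIn "complexo" dl = b1
  generalize PySem.Str.isIn "difícil" dl = b2
  generalize PySem.Str.isIn "grande" dl = b3
  revert b1 b2 b3; decide

lemma pv_split (dl : String) :
    (keywordPomodoros.filter (fun wp => PySem.Str.isIn wp.1 dl)).map Prod.snd =
      pvM1 dl ++ (pvM2 dl ++ (pvM3 dl ++ pvM4 dl)) := by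
  rw [show keywordPomodoros = pvG1 ++ (pvG2 ++ (pvG3 ++ pvG4)) from rfl]
  simp only [List.filter_append, List.map_append, pvM1, pvM2, pvM3, pvM4]

-- ===== VERDICT =====
theorem estimate_from_description_py_spec : Claim_equal_estimate_from_description_py := by
  intro description _
  show estimate_from_description_py description = estimate_from_description_py_alt description
  simp only [estimate_from_description_py, estimate_from_description_py_alt]
  rw [pv_split, PySem.List.minD, pv_min?_eq,
      pv_min_groups (pvM1 _) (pvM2 _) (pvM3 _) (pvM4 _)
        (pvG1_spec _).1 (pvG2_spec _).1 (pvG3_spec _).1 (pvG4_spec _).1]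
  simp only [(pvG1_spec _).2, (pvG2_spec _).2, (pvG3_spec _).2, (pvG4_spec _).2]
  cases (["rápido", "quick", "simples", "revisar"] : List String).any
      (fun word => PySem.Str.isIn word (PySem.Str.lower description)) <;>
    cases (["estudar", "ler", "pesquisar"] : List String).any
      (fun word => PySem.Str.isIn word (PySem.Str.lower description)) <;>
    cases (["projeto", "criar", "desenvolver"] : List String).any
      (fun word => PySem.Str.isIn word (PySem.Str.lower description)) <;>
    cases (["complexo", "difícil", "grande"] : List String).any
      (fun word => PySem.Str.isIn word (PySem.Str.lower description)) <;>
    simp
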